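-- pv_equiv track=rewrite | github.com/ata-turhan/Leetcode-Solutions | 2498-smallest-subarrays-with-maximum-bitwise-or/smallest-subarrays-with-maximum-bitwise-or.py | smallestSubarrays
-- ===== SOURCE A (Python) =====
-- from typing import List
--
-- def smallestSubarrays(nums: List[int]) -> List[int]:
--     """
--     For each start index i, find the shortest subarray nums[i..j] whose OR equals
--     the OR of the entire suffix nums[i..n-1]. We track, for each bit (0–31), the
--     closest index ≥ i at which that bit is set, then choose the farthest of these.
--     """
--     n = len(nums)
--     answer = [1] * n
--     # For each bit position, store the next index where that bit is 1; -1 if none seen yet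
--     next_pos = [-1] * 32
--
--     # Traverse from rightmost to leftmost
--     for i in range(n - 1, -1, -1):
--         x = nums[i]
--         # Update next_pos for bits set in nums[i]
--         for b in range(32):
--             if (x >> b) & 1:
--                 next_pos[b] = i
--
--         # Determine how far we must go to include all bits present in the suffix
--         farthest = i
--         for b in range(32):
--             if next_pos[b] != -1:
--                 # Extend to the furthest next occurrence among all bits
--                 farthest = max(farthest, next_pos[b])
--
--         # Length = (end_index − start_index + 1)
--         answer[i] = farthest - i + 1
--
--     return answer
-- ===== SOURCE B (Python) =====
-- def smallestSubarrays(nums):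
--     # Backward pass computes the suffix ORs of the low-32-bit views (the 32 bits
--     # the task tracks); a forward scan then grows each window until its OR
--     # reaches the suffix OR, giving the minimal length directly.
--     n = len(nums)
--     MASK = 0xFFFFFFFF
--     suffix = [0] * n
--     acc = 0
--     for i in range(n - 1, -1, -1):
--         acc |= nums[i] & MASK
--         suffix[i] = acc
--     answer = []
--     for i in range(n):
--         cur = nums[i] & MASK
--         j = i
--         while cur != suffix[i]:
--             j += 1
--             cur |= nums[j] & MASK
--         answer.append(j - i + 1)
--     return answer
-- ===== Notes on version B (the rewrite author's own statement) =====
-- stated objective: alternative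
-- what changed: Replaces A's 32-entry per-bit last-seen-index array (updated and scanned for every start index in a backward pass) by a backward suffix-OR pass plus a forward scan that grows each window until its OR reaches the suffix OR, reading off the minimal length directly.
import Mathlib
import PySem

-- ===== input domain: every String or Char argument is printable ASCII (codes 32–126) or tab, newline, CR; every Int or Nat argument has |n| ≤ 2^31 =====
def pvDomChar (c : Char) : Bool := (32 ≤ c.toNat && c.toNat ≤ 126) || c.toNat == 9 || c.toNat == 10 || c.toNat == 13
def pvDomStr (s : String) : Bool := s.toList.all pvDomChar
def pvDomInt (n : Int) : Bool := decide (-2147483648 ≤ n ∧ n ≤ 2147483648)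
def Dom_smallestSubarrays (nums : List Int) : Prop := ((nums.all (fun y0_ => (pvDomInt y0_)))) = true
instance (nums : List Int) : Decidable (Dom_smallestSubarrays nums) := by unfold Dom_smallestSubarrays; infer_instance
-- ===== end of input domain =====

-- B replaces A's per-bit last-seen-index bookkeeping by a suffix-OR array plus a
-- forward scan that grows each window until its OR reaches the suffix OR
-- (objective: alternative algorithm, same exact outputs).

-- ===== PORT A =====

-- body of A's outer loop (answer, next_pos as state; i the current index)
def pvStepA (nums : List Int) (st : List Int × List Int) (i : Int) : List Int × List Int :=
  let x := PySem.List.pyGetD nums i 0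
  let np := (PySem.List.pyRange 0 32).foldl
    (fun np b => if PySem.Int.band (x >>> b.toNat) 1 = 1 then np.set b.toNat i else np) st.2
  let farthest := (PySem.List.pyRange 0 32).foldl
    (fun f b => if PySem.List.pyGetD np b 0 ≠ -1 then max f (PySem.List.pyGetD np b 0) else f) i
  (st.1.set i.toNat (farthest - i + 1), np)

def smallestSubarrays (nums : List Int) : List Int :=
  let n := nums.length
  let answer := List.replicate n (1 : Int)
  let next_pos := List.replicate 32 (-1 : Int)
  ((PySem.List.pyRange ((n : Int) - 1) (-1) (-1)).foldl (pvStepA nums) (answer, next_pos)).1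

-- ===== PORT B =====

def pvMask : Int := 4294967295

-- the while-loop of Source B: extend the window until its OR equals the suffix OR;
-- the [] case is unreachable (the suffix OR is always reached before the list ends)
def pvScan (target : Int) (cur : Int) (rest : List Int) (len : Int) : Int :=
  if cur = target then len
  else match rest with
    | [] => len
    | y :: ys => pvScan target (PySem.Int.bor cur (PySem.Int.band y pvMask)) ys (len + 1)

-- body of Source B's backward suffix-OR loop ((acc, suffix) as state)
def pvStepB (nums : List Int) (st : Int × List Int) (i : Int) : Int × List Int :=
  let acc := PySem.Int.bor st.1 (PySem.Int.band (PySem.List.pyGetD nums i 0) pvMask)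
  (acc, st.2.set i.toNat acc)

def smallestSubarrays_alt (nums : List Int) : List Int :=
  let n := nums.length
  let suffix := ((PySem.List.pyRange ((n : Int) - 1) (-1) (-1)).foldl (pvStepB nums)
      (0, List.replicate n (0 : Int))).2
  (PySem.List.pyRange 0 (n : Int)).foldl
    (fun ans i =>
      ans ++ [pvScan (PySem.List.pyGetD suffix i 0)
        (PySem.Int.band (PySem.List.pyGetD nums i 0) pvMask)
        (List.drop (i.toNat + 1) nums) 1]) []

-- ===== PRECONDITION & SPEC =====
def Spec_smallestSubarrays (nums : List Int) (out : List Int) : Prop := out = smallestSubarrays_alt nums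
instance (nums : List Int) (out : List Int) : Decidable (Spec_smallestSubarrays nums out) := by unfold Spec_smallestSubarrays; infer_instance

-- ===== CLAIM (what is proved, stated in full; the proofs are below) =====
def Claim_equal_smallestSubarrays : Prop := ∀ (nums : List Int), Dom_smallestSubarrays nums → Spec_smallestSubarrays nums (smallestSubarrays nums)

-- ===== LEMMAS AND PROOFS =====

-- A's per-bit test, and the low-32-bit view both programs are really about
def pvBit (x : Int) (b : Nat) : Bool := decide (PySem.Int.band (x >>> b) 1 = 1)
def pvMk (x : Int) : Nat := (PySem.Int.band x pvMask).toNat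

theorem pv_band_mask (x : Int) : PySem.Int.band x pvMask = x % 4294967296 := by
  unfold PySem.Int.band pvMask
  by_cases hx : (0:Int) ≤ x
  · rw [if_pos hx, if_pos (by norm_num)]
    rw [show ((4294967295:Int).toNat) = 2^32 - 1 by rfl, Nat.and_two_pow_sub_one_eq_mod]
    omega
  · rw [if_neg hx, if_pos (by norm_num)]
    rw [show ((4294967295:Int).toNat) = 2^32 - 1 by rfl, Nat.land_comm, Nat.and_two_pow_sub_one_eq_mod]
    omega

theorem pv_mk_cast (x : Int) : PySem.Int.band x pvMask = ((pvMk x : Nat) : Int) := by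
  unfold pvMk; rw [Int.toNat_of_nonneg]; rw [pv_band_mask]; omega

theorem pv_mk_lt (x : Int) : pvMk x < 2 ^ 32 := by
  have h := pv_mk_cast x; have h2 := pv_band_mask x; omega

theorem pv_bit_testBit (x : Int) (b : Nat) (hb : b < 32) : pvBit x b = (pvMk x).testBit b := by
  unfold pvBit
  rw [PySem.Int.band_one, PySem.Int.mod_eq_emod_of_pos (by norm_num), Int.shiftRight_eq_div_pow,
    Nat.testBit_eq_decide_div_mod_eq]
  have hmk : ((pvMk x : Nat) : Int) = x % 4294967296 := by
    rw [← pv_mk_cast, pv_band_mask]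
  simp only [decide_eq_decide]
  interval_cases b <;> omega

def pvSor : List Int → Nat
  | [] => 0
  | x :: l => pvMk x ||| pvSor l

theorem pv_sor_lt (l : List Int) : pvSor l < 2 ^ 32 := by
  induction l with
  | nil => norm_num [pvSor]
  | cons x l ih => exact Nat.or_lt_two_pow (pv_mk_lt x) ih

theorem pv_testBit_sor (l : List Int) (b : Nat) (hb : b < 32) :
    (pvSor l).testBit b = l.any (fun x => pvBit x b) := by
  induction l with
  | nil => simp [pvSor]
  | cons x l ih => simp [pvSor, Nat.testBit_lor, ih, pv_bit_testBit x b hb]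

theorem pv_lor_eq_left (a s : Nat) : a ||| s = a ↔ ∀ b, s.testBit b → a.testBit b := by
  constructor
  · intro h b hs
    have h2 : (a ||| s).testBit b = a.testBit b := by rw [h]
    rw [Nat.testBit_lor, hs, Bool.or_true] at h2
    exact h2.symm
  · intro h
    apply Nat.eq_of_testBit_eq
    intro i
    rw [Nat.testBit_lor]
    cases hs : s.testBit i
    · simp
    · simp [h i hs]

def pvExt (a : Nat) : List Int → Nat
  | [] => 0
  | y :: ys => if a ||| pvSor (y :: ys) = a then 0 else pvExt (a ||| pvMk y) ys + 1

theorem pv_scan_eq (l : List Int) : ∀ (a : Nat) (k : Int),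
    pvScan ((a ||| pvSor l : Nat) : Int) ((a : Nat) : Int) l k = k + (pvExt a l : Int) := by
  induction l with
  | nil => intro a k; rw [pvScan]; simp [pvSor, pvExt]
  | cons y ys ih =>
    intro a k
    rw [pvScan, pvExt]
    by_cases h : a ||| pvSor (y :: ys) = a
    · rw [if_pos (by exact_mod_cast h.symm), if_pos h]
      simp
    · rw [if_neg (fun he => h (by exact_mod_cast he.symm)), if_neg h]
      rw [PySem.Int.bor_of_nonneg (by positivity) (by rw [pv_mk_cast]; positivity)]
      rw [pv_mk_cast]
      simp only [Int.toNat_natCast]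
      have hassoc : a ||| pvSor (y :: ys) = (a ||| pvMk y) ||| pvSor ys := by
        show a ||| (pvMk y ||| pvSor ys) = _
        rw [Nat.lor_assoc]
      rw [hassoc]
      rw [ih (a ||| pvMk y) (k + 1)]
      push_cast; ring

def pvFidx (b : Nat) (l : List Int) : Option Nat := List.findIdx? (fun x => pvBit x b) l

def pvW (a : Nat) (l : List Int) (b : Nat) : Nat :=
  if a.testBit b then 0 else (Option.map (· + 1) (pvFidx b l)).getD 0

def pvFar (a : Nat) (l : List Int) : Nat := (Finset.range 32).sup (pvW a l)

theorem pv_fidx_isSome (b : Nat) (l : List Int) :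
    (pvFidx b l).isSome = l.any (fun x => pvBit x b) := by
  simp [pvFidx, List.findIdx?_isSome]

theorem pv_far_zero (a : Nat) (l : List Int) (h : a ||| pvSor l = a) : pvFar a l = 0 := by
  rw [pvFar]
  apply Nat.eq_zero_of_le_zero
  apply Finset.sup_le
  intro b hb
  rw [Finset.mem_range] at hb
  apply le_of_eq
  rw [pvW]
  by_cases ha : a.testBit b
  · rw [if_pos ha]
  · rw [if_neg ha]
    cases hf : pvFidx b l with
    | none => rfl
    | some p =>
      exfalso
      have hany : l.any (fun x => pvBit x b) = true := by
        rw [← pv_fidx_isSome, hf]; rfl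
      have : (pvSor l).testBit b = true := by rw [pv_testBit_sor l b hb, hany]
      exact ha ((pv_lor_eq_left a (pvSor l)).mp h b this)

theorem pv_exists_needed (a : Nat) (l : List Int) (h : ¬ a ||| pvSor l = a) :
    ∃ b, b < 32 ∧ (pvSor l).testBit b = true ∧ a.testBit b = false := by
  by_contra hc
  push Not at hc
  apply h
  rw [pv_lor_eq_left]
  intro b hs
  by_cases hb : b < 32
  · cases ha : a.testBit b
    · exact absurd ha (by simpa using hc b hb hs)
    · rfl
  · exfalso
    have : pvSor l < 2 ^ b :=
      lt_of_lt_of_le (pv_sor_lt l) (Nat.pow_le_pow_right (by norm_num) (by omega))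
    rw [Nat.testBit_lt_two_pow this] at hs
    exact Bool.false_ne_true hs

theorem pv_far_step (a : Nat) (y : Int) (ys : List Int) (h : ¬ a ||| pvSor (y :: ys) = a) :
    pvFar a (y :: ys) = pvFar (a ||| pvMk y) ys + 1 := by
  apply le_antisymm
  · apply Finset.sup_le
    intro b hb
    rw [Finset.mem_range] at hb
    rw [pvW]
    by_cases ha : a.testBit b
    · rw [if_pos ha]; omega
    · rw [if_neg ha, pvFidx, List.findIdx?_cons]
      by_cases hy : pvBit y b
      · simp [hy]
      · rw [if_neg (by simpa using hy)]
        cases hf : List.findIdx? (fun x => pvBit x b) ys with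
        | none => simp
        | some p =>
          simp only [Option.map_some, Option.getD_some]
          have hW : pvW (a ||| pvMk y) ys b = p + 1 := by
            rw [pvW, if_neg, pvFidx, hf]
            · rfl
            · rw [Nat.testBit_lor]
              have : (pvMk y).testBit b = false := by
                rw [← pv_bit_testBit y b hb]; simpa using hy
              simp [ha, this]
          have : p + 1 ≤ pvFar (a ||| pvMk y) ys := hW ▸ Finset.le_sup (Finset.mem_range.mpr hb)
          omega
  · obtain ⟨b0, hb0, hsup⟩ := Finset.exists_mem_eq_sup (Finset.range 32)
      (by simp) (pvW (a ||| pvMk y) ys)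
    rw [Finset.mem_range] at hb0
    show (Finset.range 32).sup (pvW (a ||| pvMk y) ys) + 1 ≤ pvFar a (y :: ys)
    rw [hsup, pvW]
    by_cases ha0 : (a ||| pvMk y).testBit b0
    · rw [if_pos ha0]
      obtain ⟨b, hb, hs, ha⟩ := pv_exists_needed a (y :: ys) h
      -- the needed bit must be in y (else it would survive into the RHS sup, contradicting 0)
      have hyb : pvBit y b = true ∨ (∃ p, pvFidx b ys = some p) := by
        rw [pv_testBit_sor _ b hb] at hs
        simp only [List.any_cons, Bool.or_eq_true] at hs
        rcases hs with hy | hys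
        · exact Or.inl hy
        · right
          have := pv_fidx_isSome b ys
          rw [hys] at this
          exact Option.isSome_iff_exists.mp (by rw [this])
      have h1 : 1 ≤ pvFar a (y :: ys) := by
        have hW : 1 ≤ pvW a (y :: ys) b := by
          rw [pvW, if_neg (by simp [ha]), pvFidx, List.findIdx?_cons]
          rcases hyb with hy | ⟨p, hp⟩
          · simp [hy]
          · by_cases hy : pvBit y b
            · simp [hy]
            · rw [if_neg (by simpa using hy)]
              rw [pvFidx] at hp
              rw [hp]
              simp
        exact le_trans hW (Finset.le_sup (Finset.mem_range.mpr hb))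
      omega
    · rw [if_neg ha0]
      simp only [Nat.testBit_lor, Bool.or_eq_true, not_or] at ha0
      cases hf : pvFidx b0 ys with
      | none => simp only [Option.map_none, Option.getD_none]
                obtain ⟨b, hb, hs, ha⟩ := pv_exists_needed a (y :: ys) h
                have hyb : pvBit y b = true ∨ (∃ p, pvFidx b ys = some p) := by
                  rw [pv_testBit_sor _ b hb] at hs
                  simp only [List.any_cons, Bool.or_eq_true] at hs
                  rcases hs with hy | hys
                  · exact Or.inl hy
                  · right
                    have := pv_fidx_isSome b ys
                    rw [hys] at this
                    exact Option.isSome_iff_exists.mp (by rw [this])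
                have hW : 1 ≤ pvW a (y :: ys) b := by
                  rw [pvW, if_neg (by simp [ha]), pvFidx, List.findIdx?_cons]
                  rcases hyb with hy | ⟨p, hp⟩
                  · simp [hy]
                  · by_cases hy : pvBit y b
                    · simp [hy]
                    · rw [if_neg (by simpa using hy)]
                      rw [pvFidx] at hp
                      rw [hp]
                      simp
                have := le_trans hW (Finset.le_sup (α := Nat) (Finset.mem_range.mpr hb)
                  (f := pvW a (y :: ys)))
                have hEq : (Finset.range 32).sup (pvW a (y :: ys)) = pvFar a (y :: ys) := rfl
                omega
      | some p =>
        simp only [Option.map_some, Option.getD_some]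
        have hyb0 : pvBit y b0 = false := by
          have := pv_bit_testBit y b0 hb0
          rw [this]
          cases hmk : (pvMk y).testBit b0
          · rfl
          · exact absurd hmk (by simp [ha0.2])
        have hW : pvW a (y :: ys) b0 = p + 2 := by
          rw [pvW, if_neg (by simp [ha0.1]), pvFidx, List.findIdx?_cons, if_neg (by simp [hyb0])]
          rw [pvFidx] at hf
          rw [hf]
          rfl
        have := hW ▸ Finset.le_sup (α := Nat) (Finset.mem_range.mpr hb0) (f := pvW a (y :: ys))
        have hEq : (Finset.range 32).sup (pvW a (y :: ys)) = pvFar a (y :: ys) := rfl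
        omega

theorem pv_ext_eq_far (l : List Int) : ∀ (a : Nat), pvExt a l = pvFar a l := by
  induction l with
  | nil =>
    intro a
    rw [pvExt, pv_far_zero a [] (by simp [pvSor])]
  | cons y ys ih =>
    intro a
    rw [pvExt]
    by_cases h : a ||| pvSor (y :: ys) = a
    · rw [if_pos h, pv_far_zero a (y :: ys) h]
    · rw [if_neg h, pv_far_step a y ys h, ih]
theorem pv_pyRange_down (a : Int) (h : 0 ≤ a) :
    PySem.List.pyRange a (-1) (-1) = a :: PySem.List.pyRange (a - 1) (-1) (-1) := by
  simp only [PySem.List.pyRange]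
  norm_num
  rw [if_pos (by omega : (-1:Int) < a)]
  have h2 : (if 0 < a then a.toNat else 0) = a.toNat := by
    by_cases h0 : 0 < a
    · rw [if_pos h0]
    · rw [if_neg h0]; omega
  have h1 : (a + 1).toNat = a.toNat + 1 := by omega
  rw [h1, h2, List.range_succ_eq_map, List.map_cons, List.map_map]
  refine congrArg₂ _ (by norm_num) ?_
  apply List.map_congr_left
  intro k _
  simp only [Function.comp_apply, Nat.succ_eq_add_one]
  push_cast
  ring

theorem pv_pyRange_down_nil : PySem.List.pyRange (-1) (-1) (-1) = [] := by
  simp [PySem.List.pyRange]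

theorem pv_getD_map_range (f : Nat → Int) (m j : Nat) (hj : j < m) :
    (((List.range m).map f).getD j 0) = f j := by
  rw [List.getD_eq_getElem?_getD, List.getElem?_map, List.getElem?_range hj]
  rfl

theorem pv_eq_of_getD (l₁ l₂ : List Int) (hl : l₁.length = l₂.length)
    (h : ∀ j, j < l₁.length → l₁.getD j 0 = l₂.getD j 0) : l₁ = l₂ := by
  apply List.ext_getElem hl
  intro j h1 h2
  have := h j h1
  rwa [List.getD_eq_getElem l₁ 0 h1, List.getD_eq_getElem l₂ 0 h2] at this
theorem pv_setfold (v : Int) (P : Nat → Prop) [DecidablePred P] : ∀ (m : Nat) (np : List Int),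
    ((List.range m).foldl (fun acc b => if P b then acc.set b v else acc) np).length = np.length ∧
    ∀ j, j < np.length →
      ((List.range m).foldl (fun acc b => if P b then acc.set b v else acc) np).getD j 0
        = if j < m ∧ P j then v else np.getD j 0 := by
  intro m
  induction m with
  | zero =>
    intro np
    refine ⟨rfl, ?_⟩
    intro j hj
    rw [if_neg (by omega)]
    rfl
  | succ m ih =>
    intro np
    rw [List.range_succ, List.foldl_append]
    obtain ⟨ihl, ihg⟩ := ih np
    simp only [List.foldl_cons, List.foldl_nil]
    by_cases hP : P m
    · rw [if_pos hP]
      refine ⟨by rw [List.length_set, ihl], ?_⟩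
      intro j hj
      rw [List.getD_eq_getElem?_getD, List.getElem?_set]
      by_cases hjm : m = j
      · subst hjm
        rw [if_pos rfl, if_pos (by rw [ihl]; exact hj), if_pos ⟨by omega, hP⟩]
        rfl
      · rw [if_neg hjm, ← List.getD_eq_getElem?_getD, ihg j hj]
        by_cases hjlt : j < m ∧ P j
        · rw [if_pos hjlt, if_pos ⟨by omega, hjlt.2⟩]
        · rw [if_neg hjlt, if_neg ?_]
          rw [not_and] at hjlt ⊢
          intro hlt hPj
          by_cases hjm' : j = m
          · exact hjm (hjm'.symm)
          · exact hjlt (by omega) hPj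
    · rw [if_neg hP]
      refine ⟨ihl, ?_⟩
      intro j hj
      rw [ihg j hj]
      by_cases hjlt : j < m ∧ P j
      · rw [if_pos hjlt, if_pos ⟨by omega, hjlt.2⟩]
      · rw [if_neg hjlt, if_neg ?_]
        rw [not_and] at hjlt ⊢
        intro hlt hPj
        by_cases hjm : j = m
        · exact hP (hjm ▸ hPj)
        · exact hjlt (by omega) hPj
def pvNp (nums : List Int) (i : Nat) : List Int :=
  (List.range 32).map (fun b => match pvFidx b (nums.drop i) with
    | some p => ((i + p : Nat) : Int)
    | none => -1)

def pvAns (nums : List Int) (i : Nat) : Int :=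
  ((pvExt (pvMk (nums.getD i 0)) (nums.drop (i + 1)) : Nat) : Int) + 1

theorem pv_np_length (nums : List Int) (i : Nat) : (pvNp nums i).length = 32 := by
  simp [pvNp]

theorem pv_np_getD (nums : List Int) (i : Nat) (b : Nat) (hb : b < 32) :
    (pvNp nums i).getD b 0 = (match pvFidx b (nums.drop i) with
      | some p => ((i + p : Nat) : Int)
      | none => -1) := by
  rw [pvNp, pv_getD_map_range _ _ _ hb]

theorem pv_fidx_drop (nums : List Int) (i : Nat) (hi : i < nums.length) (b : Nat) :
    pvFidx b (nums.drop i) =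
      if pvBit nums[i] b then some 0
      else Option.map (· + 1) (pvFidx b (nums.drop (i+1))) := by
  rw [pvFidx, List.drop_eq_getElem_cons hi, List.findIdx?_cons]
  rfl

theorem pv_np_step (nums : List Int) (i : Nat) (hi : i < nums.length) :
    (PySem.List.pyRange 0 32).foldl
      (fun np b => if PySem.Int.band ((nums[i]) >>> b.toNat) 1 = 1 then np.set b.toNat ((i:Nat):Int) else np)
      (pvNp nums (i+1)) = pvNp nums i := by
  rw [show (32:Int) = ((32:Nat):Int) by norm_num, PySem.List.pyRange_zero_natCast, List.foldl_map]
  rw [PySem.List.foldl_congr_mem (List.range 32) _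
    (fun np (b : Nat) => if PySem.Int.band ((nums[i]) >>> b) 1 = 1 then np.set b ((i:Nat):Int) else np) _
    (by intro acc b _; simp [Int.toNat_natCast, Int.shiftRight_natCast_right])]
  obtain ⟨hlen, hget⟩ := pv_setfold ((i:Nat):Int) (fun b => PySem.Int.band ((nums[i]) >>> b) 1 = 1) 32 (pvNp nums (i+1))
  apply pv_eq_of_getD
  · rw [hlen, pv_np_length, pv_np_length]
  · intro j hj
    rw [hlen, pv_np_length] at hj
    rw [hget j (by rw [pv_np_length]; exact hj), pv_np_getD nums (i+1) j hj, pv_np_getD nums i j hj,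
      pv_fidx_drop nums i hi j]
    by_cases hbit : pvBit nums[i] j
    · have hc : PySem.Int.band (nums[i] >>> j) 1 = 1 := by rwa [pvBit, decide_eq_true_eq] at hbit
      simp [hbit, hc, hj]
    · have hc : ¬ PySem.Int.band (nums[i] >>> j) 1 = 1 := fun h => hbit (by rw [pvBit, decide_eq_true_eq]; exact h)
      simp only [if_neg hbit, if_neg (fun h : _ ∧ PySem.Int.band (nums[i] >>> j) 1 = 1 => hc h.2)]
      cases hf : pvFidx j (nums.drop (i+1)) with
      | none => rfl
      | some p =>
        simp only [Option.map_some]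
        push_cast
        ring
def pvV (nums : List Int) (i : Nat) (b : Nat) : Nat :=
  match pvFidx b (nums.drop i) with
  | some p => i + p
  | none => 0

def pvEntry (nums : List Int) (i : Nat) (b : Nat) : Int :=
  match pvFidx b (nums.drop i) with
  | some p => ((i + p : Nat) : Int)
  | none => -1

theorem pv_fold_cast (nums : List Int) (i : Nat) : ∀ (bs : List Nat) (c : Nat),
    bs.foldl (fun f b => if pvEntry nums i b ≠ -1 then max f (pvEntry nums i b) else f) ((c : Nat) : Int)
      = ((bs.foldl (fun f b => max f (pvV nums i b)) c : Nat) : Int) := by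
  intro bs
  induction bs with
  | nil => intro c; rfl
  | cons b bs ih =>
    intro c
    simp only [List.foldl_cons]
    rw [pvEntry, pvV]
    cases hf : pvFidx b (nums.drop i) with
    | none =>
      rw [if_neg (by simp)]
      have : max c 0 = c := by omega
      rw [this]
      exact ih c
    | some p =>
      rw [if_pos (by show ((i + p : Nat) : Int) ≠ -1; omega)]
      rw [show max ((c:Nat):Int) ((i + p : Nat) : Int) = ((max c (i + p) : Nat) : Int) from (Nat.cast_max _ _).symm]
      exact ih _

theorem pv_foldmax (v : Nat → Nat) : ∀ (m : Nat) (c : Nat),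
    (List.range m).foldl (fun f b => max f (v b)) c = c ⊔ (Finset.range m).sup v := by
  intro m
  induction m with
  | zero => intro c; simp
  | succ m ih =>
    intro c
    rw [List.range_succ, List.foldl_append, List.foldl_cons, List.foldl_nil, ih,
      Finset.range_add_one, Finset.sup_insert]
    rw [sup_comm ((v m)) _]
    exact sup_assoc c _ _

theorem pv_VW (nums : List Int) (i : Nat) (hi : i < nums.length) (b : Nat) (hb : b < 32) :
    (i : Nat) ⊔ pvV nums i b = i + pvW (pvMk (nums[i])) (nums.drop (i+1)) b := by
  rw [pvV, pv_fidx_drop nums i hi b, pvW, ← pv_bit_testBit _ b hb]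
  by_cases hbit : pvBit nums[i] b
  · rw [if_pos hbit, if_pos hbit]
    show (i : Nat) ⊔ (i + 0) = i + 0
    omega
  · rw [if_neg hbit, if_neg hbit]
    cases hf : pvFidx b (nums.drop (i+1)) with
    | none => simp
    | some p =>
      simp
      try omega

theorem pv_sup_VW (nums : List Int) (i : Nat) (hi : i < nums.length) :
    (i : Nat) ⊔ (Finset.range 32).sup (pvV nums i) = i + pvFar (pvMk (nums[i])) (nums.drop (i+1)) := by
  apply le_antisymm
  · apply max_le
    · omega
    · apply Finset.sup_le
      intro b hb
      rw [Finset.mem_range] at hb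
      calc pvV nums i b ≤ (i : Nat) ⊔ pvV nums i b := le_max_right _ _
        _ = i + pvW (pvMk (nums[i])) (nums.drop (i+1)) b := pv_VW nums i hi b hb
        _ ≤ i + pvFar (pvMk (nums[i])) (nums.drop (i+1)) :=
            Nat.add_le_add_left (Finset.le_sup (Finset.mem_range.mpr hb)) i
  · obtain ⟨b0, hb0, hsup⟩ := Finset.exists_mem_eq_sup (Finset.range 32) (by simp)
      (pvW (pvMk (nums[i])) (nums.drop (i+1)))
    rw [Finset.mem_range] at hb0
    rw [show pvFar (pvMk (nums[i])) (nums.drop (i+1)) = _ from hsup, ← pv_VW nums i hi b0 hb0]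
    apply max_le
    · omega
    · calc pvV nums i b0 ≤ (Finset.range 32).sup (pvV nums i) := Finset.le_sup (Finset.mem_range.mpr hb0)
        _ ≤ (i : Nat) ⊔ (Finset.range 32).sup (pvV nums i) := le_max_right _ _

theorem pv_far_fold (nums : List Int) (i : Nat) (hi : i < nums.length) :
    (PySem.List.pyRange 0 32).foldl
      (fun f b => if PySem.List.pyGetD (pvNp nums i) b 0 ≠ -1
        then max f (PySem.List.pyGetD (pvNp nums i) b 0) else f) ((i : Nat) : Int)
      = (i : Int) + (pvFar (pvMk (nums[i])) (nums.drop (i+1)) : Int) := by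
  rw [show (32:Int) = ((32:Nat):Int) by norm_num, PySem.List.pyRange_zero_natCast, List.foldl_map]
  rw [PySem.List.foldl_congr_mem (List.range 32) _
    (fun f (b : Nat) => if pvEntry nums i b ≠ -1 then max f (pvEntry nums i b) else f) _ ?_]
  · rw [pv_fold_cast nums i (List.range 32) i, pv_foldmax (pvV nums i) 32 i,
      pv_sup_VW nums i hi]
    push_cast
    ring
  · intro acc b hb
    rw [List.mem_range] at hb
    rw [PySem.List.pyGetD_of_nonneg _ _ (by positivity), Int.toNat_natCast,
      pv_np_getD nums i b hb]
    rfl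
theorem pv_getD_set (l : List Int) (i k : Nat) (v : Int) :
    (l.set i v).getD k 0 = if i = k ∧ i < l.length then v else l.getD k 0 := by
  rw [List.getD_eq_getElem?_getD, List.getElem?_set]
  by_cases hik : i = k
  · subst hik
    by_cases hlen : i < l.length
    · rw [if_pos rfl, if_pos hlen, if_pos ⟨rfl, hlen⟩]
      rfl
    · rw [if_pos rfl, if_neg hlen, if_neg (fun h => hlen h.2)]
      rw [show (none : Option Int).getD 0 = 0 from rfl, List.getD_eq_default _ _ (by omega)]
  · rw [if_neg hik, if_neg (fun h => hik h.1), ← List.getD_eq_getElem?_getD]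

theorem pv_map_getD (l : List Int) :
    (List.range l.length).map (fun k => l.getD k 0) = l := by
  apply List.ext_getElem (by simp)
  intro j h1 h2
  simp only [List.getElem_map, List.getElem_range]
  rw [List.getD_eq_getElem l 0 h2]

theorem pv_stepA_eq (nums : List Int) (i : Nat) (hi : i < nums.length) (ans : List Int) :
    pvStepA nums (ans, pvNp nums (i + 1)) ((i : Nat) : Int) =
      (ans.set i (pvAns nums i), pvNp nums i) := by
  unfold pvStepA
  simp only [PySem.List.pyGetD_eq_getElem nums 0 (by positivity : (0:Int) ≤ ((i:Nat):Int))
    (by exact_mod_cast hi), Int.toNat_natCast]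
  rw [pv_np_step nums i hi, pv_far_fold nums i hi]
  have hval : (i : Int) + (pvFar (pvMk (nums[i])) (nums.drop (i+1)) : Int) - i + 1
      = (pvFar (pvMk (nums[i])) (nums.drop (i+1)) : Int) + 1 := by ring
  rw [hval]
  have hans : pvAns nums i = (pvFar (pvMk (nums[i])) (nums.drop (i+1)) : Int) + 1 := by
    rw [pvAns, List.getD_eq_getElem nums 0 hi, pv_ext_eq_far]
  rw [hans]

theorem pv_A_loop (nums : List Int) : ∀ (i0 : Nat), i0 ≤ nums.length →
    ∀ (ans : List Int), ans.length = nums.length →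
    ((PySem.List.pyRange ((i0 : Int) - 1) (-1) (-1)).foldl (pvStepA nums) (ans, pvNp nums i0)).1 =
      (List.range nums.length).map (fun k => if k < i0 then pvAns nums k else ans.getD k 0) := by
  intro i0
  induction i0 with
  | zero =>
    intro _ ans hlen
    rw [show ((0:Nat):Int) - 1 = -1 by norm_num, pv_pyRange_down_nil]
    simp only [List.foldl_nil]
    rw [show (List.range nums.length).map (fun k => if k < 0 then pvAns nums k else ans.getD k 0)
        = (List.range nums.length).map (fun k => ans.getD k 0) from
      List.map_congr_left (fun k _ => by rw [if_neg (by omega)])]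
    rw [← hlen, pv_map_getD]
  | succ i0 ih =>
    intro h ans hlen
    rw [show ((i0 + 1 : Nat) : Int) - 1 = ((i0 : Nat) : Int) by push_cast; ring,
      pv_pyRange_down _ (by positivity), List.foldl_cons, pv_stepA_eq nums i0 (by omega) ans,
      ih (by omega) _ (by rw [List.length_set, hlen])]
    apply List.map_congr_left
    intro k hk
    rw [List.mem_range] at hk
    by_cases hki : k < i0
    · rw [if_pos hki, if_pos (by omega)]
    · rw [if_neg hki, pv_getD_set]
      by_cases hk0 : i0 = k
      · rw [if_pos ⟨hk0, by omega⟩, if_pos (by omega), hk0]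
      · rw [if_neg (fun hc => hk0 hc.1), if_neg (by omega)]

theorem pv_sor_drop (nums : List Int) (i : Nat) (hi : i < nums.length) :
    pvSor (nums.drop i) = pvMk (nums[i]) ||| pvSor (nums.drop (i+1)) := by
  rw [List.drop_eq_getElem_cons hi, pvSor]

theorem pv_B_loop (nums : List Int) : ∀ (i0 : Nat), i0 ≤ nums.length →
    ∀ (suf : List Int), suf.length = nums.length →
    (PySem.List.pyRange ((i0 : Int) - 1) (-1) (-1)).foldl (pvStepB nums)
        (((pvSor (nums.drop i0) : Nat) : Int), suf) =
      (((pvSor (nums.drop 0) : Nat) : Int),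
        (List.range nums.length).map
          (fun k => if k < i0 then ((pvSor (nums.drop k) : Nat) : Int) else suf.getD k 0)) := by
  intro i0
  induction i0 with
  | zero =>
    intro _ suf hlen
    rw [show ((0:Nat):Int) - 1 = -1 by norm_num, pv_pyRange_down_nil]
    simp only [List.foldl_nil]
    refine congrArg _ ?_
    rw [show (List.range nums.length).map (fun k => if k < 0 then ((pvSor (nums.drop k) : Nat) : Int) else suf.getD k 0)
        = (List.range nums.length).map (fun k => suf.getD k 0) from
      List.map_congr_left (fun k _ => by rw [if_neg (by omega)])]
    rw [← hlen, pv_map_getD]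
  | succ i0 ih =>
    intro h suf hlen
    rw [show ((i0 + 1 : Nat) : Int) - 1 = ((i0 : Nat) : Int) by push_cast; ring,
      pv_pyRange_down _ (by positivity), List.foldl_cons]
    have hstep : pvStepB nums (((pvSor (nums.drop (i0+1)) : Nat) : Int), suf) ((i0 : Nat) : Int)
        = (((pvSor (nums.drop i0) : Nat) : Int), suf.set i0 ((pvSor (nums.drop i0) : Nat) : Int)) := by
      unfold pvStepB
      rw [PySem.List.pyGetD_eq_getElem nums 0 (by positivity) (by exact_mod_cast h)]
      simp only [Int.toNat_natCast]
      rw [pv_mk_cast, PySem.Int.bor_of_nonneg (by positivity) (by positivity)]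
      simp only [Int.toNat_natCast]
      rw [Nat.lor_comm, ← pv_sor_drop nums i0 (by omega)]
    rw [hstep, ih (by omega) _ (by rw [List.length_set, hlen])]
    refine congrArg _ ?_
    apply List.map_congr_left
    intro k hk
    rw [List.mem_range] at hk
    by_cases hki : k < i0
    · rw [if_pos hki, if_pos (by omega)]
    · rw [if_neg hki, pv_getD_set]
      by_cases hk0 : i0 = k
      · rw [if_pos ⟨hk0, by omega⟩, if_pos (by omega), hk0]
      · rw [if_neg (fun hc => hk0 hc.1), if_neg (by omega)]

theorem pv_np_init (nums : List Int) : List.replicate 32 (-1 : Int) = pvNp nums nums.length := by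
  symm
  rw [pvNp]
  have h1 : ∀ b ∈ List.range 32, (match pvFidx b (nums.drop nums.length) with
      | some p => ((nums.length + p : Nat) : Int) | none => -1) = (fun _ : Nat => (-1:Int)) b := by
    intro b _
    rw [List.drop_length]
    rfl
  rw [List.map_congr_left h1, List.map_const', List.length_range]

theorem pv_a_eq (nums : List Int) :
    smallestSubarrays nums = (List.range nums.length).map (pvAns nums) := by
  unfold smallestSubarrays
  rw [pv_np_init nums, pv_A_loop nums nums.length le_rfl (List.replicate nums.length 1)
    (List.length_replicate)]
  apply List.map_congr_left
  intro k hk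
  rw [List.mem_range] at hk
  rw [if_pos hk]

theorem pv_alt_eq (nums : List Int) :
    smallestSubarrays_alt nums = (List.range nums.length).map (pvAns nums) := by
  have hz : ((pvSor (nums.drop nums.length) : Nat) : Int) = 0 := by rw [List.drop_length]; rfl
  have hB := pv_B_loop nums nums.length le_rfl (List.replicate nums.length 0) List.length_replicate
  rw [hz] at hB
  unfold smallestSubarrays_alt
  dsimp only
  rw [hB]
  rw [show (List.range nums.length).map
      (fun k => if k < nums.length then ((pvSor (nums.drop k) : Nat) : Int)
        else (List.replicate nums.length (0:Int)).getD k 0)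
      = (List.range nums.length).map (fun k => ((pvSor (nums.drop k) : Nat) : Int)) from
    List.map_congr_left (fun k hk => by rw [if_pos (List.mem_range.mp hk)])]
  rw [PySem.List.pyRange_zero_natCast, List.foldl_map, PySem.List.foldl_append_singleton_eq_map]
  rw [List.nil_append]
  apply List.map_congr_left
  intro k hk
  rw [List.mem_range] at hk
  have hsuf : PySem.List.pyGetD ((List.range nums.length).map
      (fun k => ((pvSor (nums.drop k) : Nat) : Int))) ((k:Nat):Int) 0
      = ((pvSor (nums.drop k) : Nat) : Int) := by
    rw [PySem.List.pyGetD_of_nonneg _ _ (by positivity), Int.toNat_natCast,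
      pv_getD_map_range _ _ _ hk]
  rw [hsuf, PySem.List.pyGetD_eq_getElem nums 0 (by positivity) (by exact_mod_cast hk)]
  simp only [Int.toNat_natCast]
  rw [pv_mk_cast, pv_sor_drop nums k hk]
  rw [pv_scan_eq (nums.drop (k+1)) (pvMk (nums[k])) 1]
  rw [pvAns, List.getD_eq_getElem nums 0 hk]
  ring

theorem pv_final (nums : List Int) : smallestSubarrays nums = smallestSubarrays_alt nums := by
  rw [pv_a_eq, pv_alt_eq]

-- ===== VERDICT (by name: the statement is the Claim_ definition above) =====
theorem smallestSubarrays_spec : Claim_equal_smallestSubarrays := by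
  intro nums _
  unfold Spec_smallestSubarrays
  exact pv_final nums
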